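-- pv_equiv track=rewrite | github.com/antrset-bit/newbotushki | app/services/llm_clean.py | _chunks_by_chars
-- ===== SOURCE A (Python) =====
-- from typing import List, Iterable
--
-- def _chunks_by_chars(text: str, max_chars: int) -> Iterable[str]:
--     paras = text.replace("\r\n", "\n").split("\n\n")
--     buf = []
--     cur = 0
--     for p in paras:
--         p = p.strip()
--         if not p:
--             if buf:
--                 yield "\n\n".join(buf)
--                 buf, cur = [], 0
--             continue
--         need = len(p) + (2 if cur > 0 else 0)
--         if cur + need > max_chars and buf:
--             yield "\n\n".join(buf)
--             buf, cur = [], 0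
--         buf.append(p); cur += need
--     if buf:
--         yield "\n\n".join(buf)
-- ===== SOURCE B (Python) =====
-- def _pack(seg, max_chars):
--     # greedy packer over one blank-free segment: string accumulator + weight counter
--     cur, acc = seg[0], len(seg[0])
--     for p in seg[1:]:
--         w = len(p) + 2
--         if acc + w > max_chars:
--             yield cur
--             cur, acc = p, w
--         else:
--             cur, acc = cur + "\n\n" + p, acc + w
--     yield cur
--
-- def _chunks_by_chars(text, max_chars):
--     paras = [p.strip() for p in text.replace("\r\n", "\n").split("\n\n")]
--     seg = []
--     for p in paras:
--         if p:
--             seg.append(p)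
--         elif seg:
--             yield from _pack(seg, max_chars)
--             seg = []
--     if seg:
--         yield from _pack(seg, max_chars)
-- ===== Notes on version B (the rewrite author's own statement) =====
-- stated objective: alternative
-- what changed: B first strips all paragraphs and groups them into blank-separated segments, then packs each segment with a string-accumulator greedy packer using fixed weights (len+2 for every non-first paragraph of a segment), instead of A's single streaming loop over raw paragraphs with a list buffer and a mutable counter.
import Mathlib
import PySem

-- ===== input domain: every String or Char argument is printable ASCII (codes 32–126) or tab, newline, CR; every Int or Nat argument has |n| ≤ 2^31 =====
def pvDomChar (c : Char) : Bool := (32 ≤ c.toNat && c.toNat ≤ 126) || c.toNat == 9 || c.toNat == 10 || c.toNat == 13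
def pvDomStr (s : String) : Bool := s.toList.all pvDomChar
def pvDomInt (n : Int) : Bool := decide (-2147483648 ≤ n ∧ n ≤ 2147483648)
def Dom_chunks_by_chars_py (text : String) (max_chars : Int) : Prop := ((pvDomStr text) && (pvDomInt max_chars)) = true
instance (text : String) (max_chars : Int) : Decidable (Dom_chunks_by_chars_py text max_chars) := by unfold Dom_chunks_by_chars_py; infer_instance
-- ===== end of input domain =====

-- B regroups the work: strip-map, split into blank-separated segments, then a per-segment
-- greedy packer with a string accumulator and fixed separator weights; same return values as A.


-- ===== PORT A =====
def pvSep : List Char := ['\n', '\n']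

-- loop body of A, on the already-stripped paragraph p; state = (yields so far, buf, cur)
def chunksAStepCore (max_chars : Int) (st : List String × List (List Char) × Int) (p : List Char) :
    List String × List (List Char) × Int :=
  if p = [] then
    if st.2.1 ≠ [] then (st.1 ++ [String.ofList (PySem.Chars.join pvSep st.2.1)], [], 0) else st
  else
    let need : Int := PySem.Chars.len p + (if st.2.2 > 0 then 2 else 0)
    let st1 := if st.2.2 + need > max_chars ∧ st.2.1 ≠ [] then
        (st.1 ++ [String.ofList (PySem.Chars.join pvSep st.2.1)], ([] : List (List Char)), (0 : Int))
      else st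
    (st1.1, st1.2.1 ++ [p], st1.2.2 + need)

-- A's loop body on the raw paragraph: `p = p.strip()` first
def chunksAStep (max_chars : Int) (st : List String × List (List Char) × Int) (p0 : List Char) :
    List String × List (List Char) × Int :=
  chunksAStepCore max_chars st (PySem.Chars.strip p0)

def chunks_by_chars_py (text : String) (max_chars : Int) : List String :=
  let paras := PySem.Chars.splitOn (PySem.Chars.replace text.toList ['\r', '\n'] ['\n']) pvSep
  let fin := paras.foldl (chunksAStep max_chars) ([], [], 0)
  fin.1 ++ (if fin.2.1 ≠ [] then [String.ofList (PySem.Chars.join pvSep fin.2.1)] else [])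

-- ===== PORT B =====
-- Source B _pack's loop body; state = (yields so far, cur string, acc weight)
def packStep (max_chars : Int) (st : List String × List Char × Int) (p : List Char) :
    List String × List Char × Int :=
  let w : Int := PySem.Chars.len p + 2
  if st.2.2 + w > max_chars then (st.1 ++ [String.ofList st.2.1], p, w)
  else (st.1, st.2.1 ++ pvSep ++ p, st.2.2 + w)

def packAlt (max_chars : Int) : List (List Char) → List String
  | [] => []  -- unreachable: _pack is only called on non-empty segments (seg[0] would raise)
  | h :: t =>
    let fin := t.foldl (packStep max_chars) ([], h, PySem.Chars.len h)
    fin.1 ++ [String.ofList fin.2.1]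

-- Source B outer loop body; state = (yields so far, current segment)
def segStep (max_chars : Int) (st : List String × List (List Char)) (p : List Char) :
    List String × List (List Char) :=
  if p ≠ [] then (st.1, st.2 ++ [p])
  else if st.2 ≠ [] then (st.1 ++ packAlt max_chars st.2, []) else st

def chunks_by_chars_py_alt (text : String) (max_chars : Int) : List String :=
  let paras := (PySem.Chars.splitOn (PySem.Chars.replace text.toList ['\r', '\n'] ['\n']) pvSep).map
      PySem.Chars.strip
  let fin := paras.foldl (segStep max_chars) ([], [])
  fin.1 ++ (if fin.2 ≠ [] then packAlt max_chars fin.2 else [])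

-- ===== PRECONDITION & SPEC =====
def Spec_chunks_by_chars_py (text : String) (max_chars : Int) (out : List String) : Prop := out = chunks_by_chars_py_alt text max_chars
instance (text : String) (max_chars : Int) (out : List String) : Decidable (Spec_chunks_by_chars_py text max_chars out) := by unfold Spec_chunks_by_chars_py; infer_instance

-- ===== CLAIM (what is proved, stated in full; the proofs are below) =====
def Claim_equal_chunks_by_chars_py : Prop := ∀ (text : String) (max_chars : Int), Dom_chunks_by_chars_py text max_chars → Spec_chunks_by_chars_py text max_chars (chunks_by_chars_py text max_chars)

-- ===== LEMMAS AND PROOFS =====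

-- the two "flush at the end" finalizers
def pvFinA (st : List String × List (List Char) × Int) : List String :=
  st.1 ++ (if st.2.1 ≠ [] then [String.ofList (PySem.Chars.join pvSep st.2.1)] else [])

def pvFinB (max_chars : Int) (st : List String × List (List Char)) : List String :=
  st.1 ++ (if st.2 ≠ [] then packAlt max_chars st.2 else [])

lemma pvJoin_append_singleton (buf : List (List Char)) (q : List Char) (h : buf ≠ []) :
    PySem.Chars.join pvSep (buf ++ [q]) = PySem.Chars.join pvSep buf ++ pvSep ++ q := by
  induction buf with
  | nil => exact absurd rfl h
  | cons a rest ih =>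
    cases rest with
    | nil =>
      simp [PySem.Chars.join_cons_cons, PySem.Chars.join_singleton]
    | cons b r =>
      have h' := ih (by simp)
      simp only [List.cons_append] at h' ⊢
      rw [PySem.Chars.join_cons_cons, PySem.Chars.join_cons_cons, h']
      simp [List.append_assoc]

-- core invariant: A's streaming fold tracks B's (segment fold + per-segment pack fold)
lemma pvMain (m : Int) : ∀ (qs : List (List Char)) (outB : List String) (seg : List (List Char))
    (outA : List String) (buf : List (List Char)) (cur : Int),
    (seg = [] → outA = outB ∧ buf = [] ∧ cur = 0) →
    (∀ h t, seg = h :: t →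
      outA = outB ++ (t.foldl (packStep m) ([], h, PySem.Chars.len h)).1 ∧
      buf ≠ [] ∧
      PySem.Chars.join pvSep buf = (t.foldl (packStep m) ([], h, PySem.Chars.len h)).2.1 ∧
      cur = (t.foldl (packStep m) ([], h, PySem.Chars.len h)).2.2 ∧ 0 < cur) →
    pvFinA (qs.foldl (chunksAStepCore m) (outA, buf, cur)) =
    pvFinB m (qs.foldl (segStep m) (outB, seg)) := by
  intro qs
  induction qs with
  | nil =>
    intro outB seg outA buf cur h1 h2
    cases seg with
    | nil =>
      obtain ⟨ho, hb, _⟩ := h1 rfl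
      simp [pvFinA, pvFinB, ho, hb]
    | cons h t =>
      obtain ⟨ho, hb, hj, _, _⟩ := h2 h t rfl
      simp [pvFinA, pvFinB, hb, ho, hj, packAlt, List.append_assoc]
  | cons q rest ih =>
    intro outB seg outA buf cur h1 h2
    simp only [List.foldl_cons]
    by_cases hq : q = []
    · subst hq
      cases seg with
      | nil =>
        obtain ⟨ho, hb, hc⟩ := h1 rfl
        subst hb; subst hc
        have eA : chunksAStepCore m (outA, [], 0) [] = (outA, [], 0) := by
          simp [chunksAStepCore]
        have eB : segStep m (outB, ([] : List (List Char))) [] = (outB, []) := by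
          simp [segStep]
        rw [eA, eB]
        exact ih outB [] outA [] 0 h1 h2
      | cons h t =>
        obtain ⟨ho, hb, hj, _, _⟩ := h2 h t rfl
        have eA : chunksAStepCore m (outA, buf, cur) [] =
            (outA ++ [String.ofList (PySem.Chars.join pvSep buf)], [], 0) := by
          simp [chunksAStepCore, hb]
        have eB : segStep m (outB, h :: t) [] = (outB ++ packAlt m (h :: t), []) := by
          simp [segStep]
        rw [eA, eB]
        apply ih
        · intro _
          refine ⟨?_, rfl, rfl⟩
          simp [ho, hj, packAlt, List.append_assoc]
        · intro h' t' hcon; exact absurd hcon (by simp)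
    · -- q is a non-empty stripped paragraph
      have hlen : (0 : Int) < q.length := by
        exact_mod_cast List.length_pos_iff.mpr hq
      cases seg with
      | nil =>
        obtain ⟨ho, hb, hc⟩ := h1 rfl
        subst hb; subst hc
        have eA : chunksAStepCore m (outA, [], 0) q = (outA, [q], PySem.Chars.len q) := by
          simp [chunksAStepCore, hq]
        have eB : segStep m (outB, ([] : List (List Char))) q = (outB, [q]) := by
          simp [segStep, hq]
        rw [eA, eB]
        apply ih
        · intro hcon; exact absurd hcon (by simp)
        · intro h' t' hcon
          injection hcon with e1 e2
          subst e1; subst e2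
          refine ⟨by simp [ho], by simp, by simp [PySem.Chars.join_singleton], rfl, ?_⟩
          simp only [PySem.Chars.len_eq]
          omega
      | cons h t =>
        obtain ⟨ho, hb, hj, hcu, hpos⟩ := h2 h t rfl
        have eB : segStep m (outB, h :: t) q = (outB, h :: (t ++ [q])) := by
          simp [segStep, hq]
        rw [eB]
        have hfold : (t ++ [q]).foldl (packStep m) ([], h, PySem.Chars.len h) =
            packStep m (t.foldl (packStep m) ([], h, PySem.Chars.len h)) q := by
          simp
        by_cases hcond : m < cur + ((q.length : Int) + 2)
        · -- capacity flush
          have hcond' : m <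
              (t.foldl (packStep m) ([], h, PySem.Chars.len h)).2.2 + ((q.length : Int) + 2) := by
            rw [← hcu]; exact hcond
          simp only [PySem.Chars.len_eq] at hcond'
          have eA : chunksAStepCore m (outA, buf, cur) q =
              (outA ++ [String.ofList (PySem.Chars.join pvSep buf)], [q],
                PySem.Chars.len q + 2) := by
            simp [chunksAStepCore, hq, hb, hpos, hcond]
          have eP : packStep m (t.foldl (packStep m) ([], h, PySem.Chars.len h)) q =
              ((t.foldl (packStep m) ([], h, PySem.Chars.len h)).1 ++
                [String.ofList (t.foldl (packStep m) ([], h, PySem.Chars.len h)).2.1], q,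
                PySem.Chars.len q + 2) := by
            simp [packStep, hcond']
          rw [eA]
          apply ih
          · intro hcon; exact absurd hcon (by simp)
          · intro h' t' hcon
            injection hcon with e1 e2
            subst e1; subst e2
            rw [hfold, eP]
            refine ⟨?_, by simp, by simp [PySem.Chars.join_singleton], rfl, ?_⟩
            · simp [ho, hj, List.append_assoc]
            · simp only [PySem.Chars.len_eq]; omega
        · -- fits into the current chunk
          have hcond' : ¬ m <
              (t.foldl (packStep m) ([], h, PySem.Chars.len h)).2.2 + ((q.length : Int) + 2) := by
            rw [← hcu]; exact hcond
          simp only [PySem.Chars.len_eq] at hcond'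
          have eA : chunksAStepCore m (outA, buf, cur) q =
              (outA, buf ++ [q], cur + (PySem.Chars.len q + 2)) := by
            simp [chunksAStepCore, hq, hpos, hcond]
          have eP : packStep m (t.foldl (packStep m) ([], h, PySem.Chars.len h)) q =
              ((t.foldl (packStep m) ([], h, PySem.Chars.len h)).1,
                (t.foldl (packStep m) ([], h, PySem.Chars.len h)).2.1 ++ pvSep ++ q,
                (t.foldl (packStep m) ([], h, PySem.Chars.len h)).2.2 +
                  (PySem.Chars.len q + 2)) := by
            simp [packStep, hcond']
          rw [eA]
          apply ih
          · intro hcon; exact absurd hcon (by simp)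
          · intro h' t' hcon
            injection hcon with e1 e2
            subst e1; subst e2
            rw [hfold, eP]
            refine ⟨ho, by simp [hb], ?_, by rw [hcu], ?_⟩
            · rw [pvJoin_append_singleton buf q hb, hj]
            · simp only [PySem.Chars.len_eq]; omega

-- bridge: A's fused fold (strip inside the body) is the fold of the core over the stripped list
lemma pvFoldA (m : Int) (init : List String × List (List Char) × Int) (l : List (List Char)) :
    List.foldl (chunksAStep m) init l =
    List.foldl (chunksAStepCore m) init (l.map PySem.Chars.strip) := by
  rw [List.foldl_map]
  rfl

-- ===== VERDICT (by name: the statement is the Claim_ definition above) =====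
theorem chunks_by_chars_py_spec : Claim_equal_chunks_by_chars_py := by
  intro text max_chars _
  show chunks_by_chars_py text max_chars = chunks_by_chars_py_alt text max_chars
  simp only [chunks_by_chars_py, chunks_by_chars_py_alt]
  rw [pvFoldA]
  have := pvMain max_chars
    ((PySem.Chars.splitOn (PySem.Chars.replace text.toList ['\r', '\n'] ['\n']) pvSep).map
      PySem.Chars.strip) [] [] [] [] 0 (fun _ => ⟨rfl, rfl, rfl⟩)
    (fun h t hcon => absurd hcon (by simp))
  simpa [pvFinA, pvFinB] using this
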